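-- pv_equiv track=rewrite | github.com/Sejalsavran/PythonCodes | PythonPrograms/function.py | return_largest
-- ===== SOURCE A (Python) =====
-- def return_largest(li):
--
--     max_li=len(li[0])
--     max_ele=li[0]
--
--     for xyz in li:
--         if max_li<=len(xyz):
--             max_li=len(xyz)
--             max_ele=xyz
--     return max_ele
-- ===== SOURCE B (Python) =====
-- def return_largest(li):
--     # Stable sort by length, then take the final element: among elements of
--     # maximal length the stable sort keeps original order, so the last one
--     # wins -- matching A's `<=` tie-break.
--     return sorted(li, key=len)[-1]
-- ===== Notes on version B (the rewrite author's own statement) =====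
-- stated objective: simpler
-- what changed: Replaces the explicit max-tracking scan (separate max length and max element variables) with a one-liner: stable-sort the list by element length and take the last element; stability reproduces A's last-wins tie-break on equal lengths.
import Mathlib
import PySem

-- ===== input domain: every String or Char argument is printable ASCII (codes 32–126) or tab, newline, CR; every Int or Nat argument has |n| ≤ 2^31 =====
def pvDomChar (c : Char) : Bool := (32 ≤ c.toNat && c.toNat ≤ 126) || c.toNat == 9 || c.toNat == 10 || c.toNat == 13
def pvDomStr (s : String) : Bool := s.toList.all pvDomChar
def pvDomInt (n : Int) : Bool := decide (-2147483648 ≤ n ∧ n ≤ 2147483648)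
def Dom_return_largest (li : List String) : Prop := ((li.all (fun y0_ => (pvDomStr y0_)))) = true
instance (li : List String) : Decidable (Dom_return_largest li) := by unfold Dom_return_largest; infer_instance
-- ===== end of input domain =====

-- B replaces A's max-tracking scan by a stable sort on element length followed by taking
-- the last element (stability reproduces A's last-wins `<=` tie-break); objective: simpler.


-- ===== PORT A =====
-- Literal port of A: read li[0] (IndexError on empty, excluded by Pre_), then scan with
-- state (max_li, max_ele), updating on `max_li <= len(xyz)`.
def return_largest (li : List String) : String :=
  match PySem.List.pyGet? li 0 with
  | none => ""   -- li[0] raises IndexError in Python; unreachable under Pre_return_largest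
  | some h =>
    (li.foldl
      (fun s xyz => if s.1 ≤ PySem.Str.len xyz then (PySem.Str.len xyz, xyz) else s)
      (PySem.Str.len h, h)).2

-- ===== PORT B =====
-- Literal port of B: sorted(li, key=len)[-1]; [-1] on the empty list raises, excluded by Pre_.
def return_largest_alt (li : List String) : String :=
  (PySem.List.pyGet? (PySem.List.sorted li PySem.Str.len false) (-1)).getD ""

-- ===== PRECONDITION & SPEC =====
-- Both A (li[0]) and B ([-1]) raise IndexError exactly on the empty list.
def Pre_return_largest (li : List String) : Prop := li ≠ []
instance (li : List String) : Decidable (Pre_return_largest li) := by unfold Pre_return_largest; infer_instance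
def pvWitness_return_largest : List String := (["ab", "c", "xy"])
def Spec_return_largest (li : List String) (out : String) : Prop := out = return_largest_alt li
instance (li : List String) (out : String) : Decidable (Spec_return_largest li out) := by unfold Spec_return_largest; infer_instance

-- ===== CLAIM (what is proved, stated in full; the proofs are below) =====
def Claim_equal_return_largest : Prop := ∀ (li : List String), Dom_return_largest li → Pre_return_largest li → Spec_return_largest li (return_largest li)

-- ===== LEMMAS AND PROOFS =====

-- the "winner so far" step A's loop maintains in its second component
def pvStep (a x : String) : String := if PySem.Str.len a ≤ PySem.Str.len x then x else a

-- A's pair-state fold, projected: the first component is always the length of the second.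
theorem pvFoldA (li : List String) : ∀ (e : String),
    li.foldl (fun s xyz => if s.1 ≤ PySem.Str.len xyz then (PySem.Str.len xyz, xyz) else s)
      (PySem.Str.len e, e)
    = (PySem.Str.len (li.foldl pvStep e), li.foldl pvStep e) := by
  induction li with
  | nil => intro e; simp
  | cons x t ih =>
    intro e
    simp only [List.foldl_cons]
    have hstep : (if PySem.Str.len e ≤ PySem.Str.len x then (PySem.Str.len x, x)
        else (PySem.Str.len e, e)) = (PySem.Str.len (pvStep e x), pvStep e x) := by
      unfold pvStep; split <;> rfl
    rw [hstep, ih]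

theorem pvInsertBy_ne_nil {α : Type} (before : α → α → Bool) (x : α) (ys : List α) :
    PySem.List.insertBy before x ys ≠ [] := by
  cases ys with
  | nil => simp [PySem.List.insertBy]
  | cons y t =>
    simp only [PySem.List.insertBy]
    split <;> simp

-- last element after a stable insertion: the old last survives iff x sorts strictly before something
theorem pvLast_insertBy {α : Type} (before : α → α → Bool) (x : α) (ys : List α) :
    (PySem.List.insertBy before x ys).getLast?
      = if ys.any (fun y => before x y) then ys.getLast? else some x := by
  induction ys with
  | nil => simp [PySem.List.insertBy]
  | cons y t ih =>
    simp only [PySem.List.insertBy, List.any_cons]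
    by_cases h : before x y
    · simp [h, List.getLast?_cons_cons]
    · simp only [h, Bool.false_or, Bool.false_eq_true, if_false]
      rcases hr : PySem.List.insertBy before x t with _ | ⟨z, r⟩
      · exact absurd hr (pvInsertBy_ne_nil before x t)
      · rw [List.getLast?_cons_cons]
        rw [hr] at ih
        cases t with
        | nil =>
          simp [PySem.List.insertBy] at hr
          rcases hr with ⟨rfl, rfl⟩
          simp
        | cons w u => rw [ih, List.getLast?_cons_cons]

-- in a list sorted by key, "some element beats x" is "the last element beats x"
theorem pvAny_sorted (xs : List String) (x m : String)
    (hm : (PySem.List.sorted xs PySem.Str.len false).getLast? = some m) :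
    ((PySem.List.sorted xs PySem.Str.len false).any
        (fun y => decide (PySem.Str.len x < PySem.Str.len y)) = true)
      ↔ PySem.Str.len x < PySem.Str.len m := by
  have hp := PySem.List.sorted_pairwise xs PySem.Str.len
  constructor
  · intro h
    rcases List.any_eq_true.mp h with ⟨y, hy, hxy⟩
    have hxy' : PySem.Str.len x < PySem.Str.len y := of_decide_eq_true hxy
    -- y ≤ m since m is the last element of a pairwise-≤ list
    rcases List.getLast?_eq_some_iff.mp hm with ⟨pre, hpre⟩
    rw [hpre] at hy hp
    rcases List.mem_append.mp hy with hy1 | hy2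
    · have := (List.pairwise_append.mp hp).2.2 y hy1 m (by simp)
      exact lt_of_lt_of_le hxy' this
    · simp at hy2; subst hy2; exact hxy'
  · intro h
    refine List.any_eq_true.mpr ⟨m, ?_, by simpa using h⟩
    exact List.mem_of_getLast? hm

-- main invariant: folding the rest of the list into an already-sorted nonempty prefix,
-- the last element of the sort is exactly A's scan over the rest
theorem pvMain (li : List String) : ∀ (ys : List String) (m : String),
    (PySem.List.sorted ys PySem.Str.len false).getLast? = some m →
    (PySem.List.sorted (ys ++ li) PySem.Str.len false).getLast? = some (li.foldl pvStep m) := by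
  induction li with
  | nil => intro ys m hm; simpa using hm
  | cons x t ih =>
    intro ys m hm
    have hstep : (PySem.List.sorted (ys ++ [x]) PySem.Str.len false).getLast? = some (pvStep m x) := by
      rw [PySem.List.sorted_eq_foldl_insertBy, List.foldl_append]
      rw [← PySem.List.sorted_eq_foldl_insertBy]
      simp only [List.foldl_cons, List.foldl_nil]
      rw [pvLast_insertBy]
      by_cases h : PySem.Str.len x < PySem.Str.len m
      · rw [if_pos ((pvAny_sorted ys x m hm).mpr h), hm, pvStep, if_neg (by omega)]
      · rw [if_neg (by simpa using (not_iff_not.mpr (pvAny_sorted ys x m hm)).mpr h),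
          pvStep, if_pos (by omega)]
    have := ih (ys ++ [x]) (pvStep m x) hstep
    simpa [List.append_assoc] using this

theorem pvGet_neg_one {α : Type} (l : List α) (h : l ≠ []) :
    PySem.List.pyGet? l (-1) = l.getLast? := by
  rcases l with _ | ⟨a, t⟩
  · simp at h
  · simp [PySem.List.pyGet?, PySem.List.pyIdx?, List.getLast?_eq_getElem?]

-- ===== VERDICT (by name: the statement is the Claim_ definition above) =====
theorem return_largest_spec : Claim_equal_return_largest := by
  intro li _ hpre
  unfold Spec_return_largest return_largest return_largest_alt
  rcases li with _ | ⟨h, t⟩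
  · exact absurd rfl hpre
  · have h0 : PySem.List.pyGet? (h :: t) 0 = some h := by simp [PySem.List.pyGet?, PySem.List.pyIdx?]
    simp only [h0]
    have hsingle : (PySem.List.sorted [h] PySem.Str.len false).getLast? = some h := by
      simp [PySem.List.sorted, PySem.List.insertBy]
    have hmain := pvMain t [h] h hsingle
    have hne : PySem.List.sorted (h :: t) PySem.Str.len false ≠ [] := by
      simp [PySem.List.sorted_eq_nil_iff]
    rw [pvGet_neg_one _ hne]
    rw [show ([h] ++ t = h :: t) from rfl] at hmain
    rw [hmain]
    simp only [Option.getD_some]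
    rw [pvFoldA]
    simp only [List.foldl_cons]
    unfold pvStep
    simp
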